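-- pv_equiv track=rewrite | github.com/Kaleswarydon/AdventOfCode | 2023/Day14/puzzle14.py | tilt_cycle
-- ===== SOURCE A (Python) =====
-- def get_col(matrix, row_id):
--     return [matrix[i][row_id] for i in range(len(matrix))]
--
-- def transpose(m):
--     if type(m[0]) is not list and type(m[0]) is not str:
--         return m
--     res = [get_col(m, i) for i in range(len(m[0]))]
--     if type(m[0]) is str:
--         return [''.join(j) for j in [get_col(m, i) for i in range(len(m[0]))]]
--     else:
--         return res
--
-- def tilt(tile, direction):
--     temp_tile = None
--     res = []
--     sort_mode_reversed = False
--     transposed = False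
--     if direction == 'up' or direction == 'north':
--         temp_tile = transpose(tile)
--         #print_list_pretty(temp_tile)
--         transposed = True
--         sort_mode_reversed = True
--     if direction == 'down' or direction == 'south':
--         temp_tile = transpose(tile)
--         #print_list_pretty(temp_tile)
--         transposed = True
--         sort_mode_reversed = False
--     if direction == 'left' or direction == 'west':
--         temp_tile = tile
--         #print_list_pretty(temp_tile)
--         transposed = False
--         sort_mode_reversed = True
--     if direction == 'right' or direction == 'east':
--         temp_tile = tile
--         #print_list_pretty(temp_tile)
--         transposed = False
--         sort_mode_reversed = False
--
--     for row in temp_tile: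
--         split_at_stationbary_rock = row.split('#')
--         tmp_row = []
--         for s in split_at_stationbary_rock:
--             tmp_row.append(''.join((list(sorted(list(s), reverse=sort_mode_reversed)))))
--         res.append('#'.join(tmp_row))
--     if transposed:
--         res = transpose(res)
--     return res
--
-- def tilt_cycle(tile, amount):
--     temp_tile = tile
--     tilt_dict = {}
--     intermediate = ()
--     for a in range(1, amount + 1):
--         temp_tile = tilt(temp_tile, "north")
--         temp_tile = tilt(temp_tile, "west")
--         temp_tile = tilt(temp_tile, "south")
--         temp_tile = tilt(temp_tile, "east")
--         hash_val = hash(''.join(temp_tile))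
--         if not tilt_dict.get(hash_val):
--             tilt_dict.update({hash_val: a})
--         else:
--             intermediate = (a, tilt_dict.get(hash_val))
--             break
--     return temp_tile, intermediate
-- ===== SOURCE B (Python) =====
-- def _transpose(m):
--     if type(m[0]) is not list and type(m[0]) is not str:
--         return m
--     res = [[m[i][j] for i in range(len(m))] for j in range(len(m[0]))]
--     if type(m[0]) is str:
--         return [''.join(col) for col in res]
--     return res
--
-- def _flush(counts, rev):
--     rng = range(127, -1, -1) if rev else range(128)
--     return ''.join(chr(c) * counts[c] for c in rng)
--
-- def _pack(row, rev):
--     # counting scan: tally the chars of the current segment, emit them packed at '#'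
--     out = []
--     counts = [0] * 128
--     for ch in row:
--         if ch == '#':
--             out.append(_flush(counts, rev))
--             out.append('#')
--             counts = [0] * 128
--         else:
--             counts[ord(ch)] += 1
--     out.append(_flush(counts, rev))
--     return ''.join(out)
--
-- def _spin(tile):
--     t = _transpose(tile)                 # columns: tilt north
--     t = [_pack(r, True) for r in t]
--     t = _transpose(t)                    # back to rows: tilt west
--     t = [_pack(r, True) for r in t]
--     t = _transpose(t)                    # columns: tilt south
--     t = [_pack(r, False) for r in t]
--     t = _transpose(t)                    # back to rows: tilt east
--     t = [_pack(r, False) for r in t]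
--     return t
--
-- def tilt_cycle(tile, amount):
--     cur = tile
--     seen = {}
--     info = ()
--     for a in range(1, amount + 1):
--         cur = _spin(cur)
--         key = ''.join(cur)
--         prev = seen.get(key)
--         if prev is not None:
--             info = (a, prev)
--             break
--         seen[key] = a
--     return cur, info
-- ===== Notes on version B (the rewrite author's own statement) =====
-- stated objective: alternative
-- what changed: The per-row rock packing no longer splits each row at '#' and comparison-sorts every segment: B does one left-to-right scan per row that tallies the current segment's characters in a 128-entry count array and emits them in (ascending or descending) code order at each '#', i.e. a counting-sort packing fused with the segment splitting; the cycle-detection loop keys its dict by the joined grid string directly instead of its hash.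
-- outside the precondition, e.g. on tilt_cycle([], 1): A raises IndexError, B raises IndexError; on tilt_cycle([''], 1): A raises IndexError, B raises IndexError; on tilt_cycle(['abc', 'a'], 1): A raises IndexError, B raises IndexError
import Mathlib
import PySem

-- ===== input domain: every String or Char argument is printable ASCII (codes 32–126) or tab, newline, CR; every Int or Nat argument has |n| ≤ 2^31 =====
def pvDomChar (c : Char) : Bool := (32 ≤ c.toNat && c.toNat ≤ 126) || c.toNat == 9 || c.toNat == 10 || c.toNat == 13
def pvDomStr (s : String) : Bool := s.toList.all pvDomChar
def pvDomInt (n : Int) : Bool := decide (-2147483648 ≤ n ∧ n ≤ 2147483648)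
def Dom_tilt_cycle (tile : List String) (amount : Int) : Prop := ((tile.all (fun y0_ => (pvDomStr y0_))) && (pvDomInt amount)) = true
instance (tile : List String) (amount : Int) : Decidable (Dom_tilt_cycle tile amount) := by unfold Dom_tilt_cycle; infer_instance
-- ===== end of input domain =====

-- B replaces tilt's split-'#'-and-sort row packing by a single counting scan per row
-- (tally the segment's characters, emit them in code order at each '#'): same values, no comparison sort.


-- ===== PORT A =====
-- Grids are lists of char-lists (Python strings row by row); rows are rebuilt into `String` at the very end.

-- get_col(matrix, row_id) = [matrix[i][row_id] for i in range(len(matrix))]; pyGetD is the total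
-- form of the indexing (always in range under Pre_)
def pvA_getCol (m : List (List Char)) (i : Int) : List Char :=
  m.map (fun r => PySem.List.pyGetD r i ' ')

-- transpose(m) on a list of strings; Python's m[0] raises on [] (excluded by Pre_), headD is the total form
def pvA_transpose (m : List (List Char)) : List (List Char) :=
  (List.range (m.headD []).length).map (fun (i : Nat) => pvA_getCol m (i : Int))

-- the per-row body of tilt's loop: '#'.join(''.join(sorted(s, reverse=rev)) for s in row.split('#'))
def pvA_tiltRow (rev : Bool) (row : List Char) : List Char :=
  PySem.Chars.join ['#'] ((PySem.Chars.splitOn row ['#']).map (fun s => PySem.List.sorted s (fun x => x) rev))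

-- tilt(tile, direction); Python initialises temp_tile = None — the four branches cover every call
-- site, so the initial triple (tile, false, false) below is never observable
def pvA_tilt (tile : List (List Char)) (direction : String) : List (List Char) :=
  let p : List (List Char) × Bool × Bool := (tile, false, false)
  let p := if direction == "up" || direction == "north" then (pvA_transpose tile, true, true) else p
  let p := if direction == "down" || direction == "south" then (pvA_transpose tile, true, false) else p
  let p := if direction == "left" || direction == "west" then (tile, false, true) else p
  let p := if direction == "right" || direction == "east" then (tile, false, false) else p
  let res := p.1.map (pvA_tiltRow p.2.2)
  if p.2.1 then pvA_transpose res else res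

-- the `for a in range(1, amount+1)` loop with its break, as fuel recursion (fuel = remaining
-- iterations). Python keys tilt_dict by hash(''.join(temp_tile)); the port keys it by the joined
-- grid itself, which is what the hash stands for (a hash collision would change Python, not the port).
-- `if not tilt_dict.get(hash_val)` reads the value's truthiness: absent → None → falsy, and every
-- stored value is an `a` ≥ 1, hence truthy — getD … 0 == 0 is exactly that test.
def pvA_loop : Nat → Int → List (List Char) → PySem.Dict (List Char) Int → List (List Char) × List Int
  | 0, _, t, _ => (t, [])
  | fuel+1, a, t, d =>
    let t1 := pvA_tilt t "north"
    let t2 := pvA_tilt t1 "west"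
    let t3 := pvA_tilt t2 "south"
    let t4 := pvA_tilt t3 "east"
    let key := PySem.Chars.join [] t4
    if PySem.Dict.getD d key 0 == 0 then
      pvA_loop fuel (a+1) t4 (d.insert key a)
    else
      (t4, [a, PySem.Dict.getD d key 0])

def tilt_cycle (tile : List String) (amount : Int) : List String × List Int :=
  let r := pvA_loop amount.toNat 1 (tile.map String.toList) PySem.Dict.empty
  (r.1.map (fun cs => String.mk cs), r.2)

-- ===== PORT B =====
def pvB_transpose (m : List (List Char)) : List (List Char) :=
  (List.range (m.headD []).length).map (fun (j : Nat) => m.map (fun r => PySem.List.pyGetD r (j : Int) ' '))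

-- _flush(counts, rev): ''.join(chr(c) * counts[c] for c in rng)
def pvB_flush (rev : Bool) (counts : List Int) : List Char :=
  PySem.Chars.join []
    ((if rev then PySem.List.pyRange 127 (-1) (-1) else PySem.List.pyRange 0 128 1).map
      (fun c => List.replicate (PySem.List.pyGetD counts c 0).toNat (Char.ofNat c.toNat)))

-- counts[ord(ch)] += 1 (total form of the indexing; ord(ch) < 128 on the stated domain)
def pvB_bump (counts : List Int) (ch : Char) : List Int :=
  PySem.List.pySetD counts (ch.toNat : Int) (PySem.List.pyGetD counts (ch.toNat : Int) 0 + 1)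

-- the `for ch in row` loop of _pack; out is the list of emitted pieces, joined at the end
def pvB_packGo (rev : Bool) : List Char → List Int → List (List Char) → List Char
  | [], counts, out => PySem.Chars.join [] (out ++ [pvB_flush rev counts])
  | ch :: rest, counts, out =>
    if ch == '#' then
      pvB_packGo rev rest (List.replicate 128 0) (out ++ [pvB_flush rev counts, ['#']])
    else
      pvB_packGo rev rest (pvB_bump counts ch) out

def pvB_pack (rev : Bool) (row : List Char) : List Char :=
  pvB_packGo rev row (List.replicate 128 0) []

-- _spin: north, west, south, east in sequence, alternating orientation by transposition
def pvB_spin (tile : List (List Char)) : List (List Char) :=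
  let t := pvB_transpose tile
  let t := t.map (pvB_pack true)      -- north
  let t := pvB_transpose t
  let t := t.map (pvB_pack true)      -- west
  let t := pvB_transpose t
  let t := t.map (pvB_pack false)     -- south
  let t := pvB_transpose t
  t.map (pvB_pack false)              -- east

-- the `for a in range(1, amount+1)` loop of B with its break, as fuel recursion; the dict is keyed
-- by the joined grid (B's Python uses the string key directly)
def pvB_loop : Nat → Int → List (List Char) → PySem.Dict (List Char) Int → List (List Char) × List Int
  | 0, _, cur, _ => (cur, [])
  | fuel+1, a, cur, seen =>
    let cur' := pvB_spin cur
    let key := PySem.Chars.join [] cur'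
    match seen.get? key with
    | some prev => (cur', [a, prev])
    | none => pvB_loop fuel (a+1) cur' (seen.insert key a)

def tilt_cycle_alt (tile : List String) (amount : Int) : List String × List Int :=
  let r := pvB_loop amount.toNat 1 (tile.map String.toList) PySem.Dict.empty
  (r.1.map (fun cs => String.mk cs), r.2)

-- ===== PRECONDITION & SPEC =====
-- Pre_ excludes exactly the inputs on which Python A raises IndexError: when at least one cycle runs,
-- the grid must be nonempty, its first row nonempty, and no row shorter than the first row.
def Pre_tilt_cycle (tile : List String) (amount : Int) : Prop :=
  amount < 1 ∨ (tile ≠ [] ∧ 0 < (tile.headD "").toList.length ∧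
    ∀ s ∈ tile, (tile.headD "").toList.length ≤ s.toList.length)
instance (tile : List String) (amount : Int) : Decidable (Pre_tilt_cycle tile amount) := by
  unfold Pre_tilt_cycle; infer_instance

def pvWitness_tilt_cycle : List String × Int := (["O.#O", "..O.", ".#.O"], 2)

def Spec_tilt_cycle (tile : List String) (amount : Int) (out : List String × List Int) : Prop := out = tilt_cycle_alt tile amount
instance (tile : List String) (amount : Int) (out : List String × List Int) : Decidable (Spec_tilt_cycle tile amount out) := by unfold Spec_tilt_cycle; infer_instance

-- ===== CLAIM (what is proved, stated in full; the proofs are below) =====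
def Claim_equal_tilt_cycle : Prop := ∀ (tile : List String) (amount : Int), Dom_tilt_cycle tile amount → Pre_tilt_cycle tile amount → Spec_tilt_cycle tile amount (tilt_cycle tile amount)

-- ===== LEMMAS AND PROOFS =====

def pvAsciiRow (r : List Char) : Prop := ∀ c ∈ r, c.toNat < 128
def pvAsciiGrid (g : List (List Char)) : Prop := ∀ r ∈ g, pvAsciiRow r

-- ---- splitOn characterisation ----
def pvSplit : List Char → List Char → List (List Char)
  | [], cur => [cur.reverse]
  | c :: rest, cur => if c = '#' then cur.reverse :: pvSplit rest [] else pvSplit rest (c :: cur)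

theorem pv_go_eq (fuel : Nat) : ∀ (l cur : List Char) (acc : List (List Char)), l.length < fuel →
    PySem.Chars.splitOn.go ['#'] fuel l cur acc = acc.reverse ++ pvSplit l cur := by
  induction fuel with
  | zero => intro l cur acc h; omega
  | succ f ih =>
    intro l cur acc h
    cases l with
    | nil => rw [PySem.Chars.splitOn.go]; simp [pvSplit]; omega
    | cons c rest =>
      have hlt : rest.length < f := by simp at h; omega
      rw [PySem.Chars.splitOn.go]
      by_cases hc : c = '#'
      · subst hc
        simp [List.isPrefixOf, ih _ _ _ hlt, pvSplit]
      · simp [List.isPrefixOf, Ne.symm hc, ih _ _ _ hlt, pvSplit, hc]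

theorem pv_splitOn_eq (l : List Char) : PySem.Chars.splitOn l ['#'] = pvSplit l [] := by
  have := pv_go_eq (l.length + 1) l [] [] (by omega)
  simpa [PySem.Chars.splitOn] using this

theorem pvSplit_no_hash : ∀ (l cur : List Char), '#' ∉ l → pvSplit l cur = [cur.reverse ++ l] := by
  intro l; induction l with
  | nil => intro cur _; simp [pvSplit]
  | cons c rest ih =>
    intro cur h
    simp only [List.mem_cons, not_or] at h
    simp [pvSplit, Ne.symm h.1, ih _ h.2]

theorem pvSplit_hash : ∀ (p : List Char) (rest cur : List Char), '#' ∉ p →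
    pvSplit (p ++ '#' :: rest) cur = (cur.reverse ++ p) :: pvSplit rest [] := by
  intro p; induction p with
  | nil => intro rest cur _; simp [pvSplit]
  | cons c q ih =>
    intro rest cur h
    simp only [List.mem_cons, not_or] at h
    simp [pvSplit, Ne.symm h.1, ih _ _ h.2]

theorem pvSplit_ne_nil (l cur : List Char) : pvSplit l cur ≠ [] := by
  induction l generalizing cur with
  | nil => simp [pvSplit]
  | cons c rest ih => by_cases hc : c = '#' <;> simp [pvSplit, hc, ih]

-- ---- join with empty separator is flatten ----
theorem pv_join_nil_flatten (parts : List (List Char)) :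
    PySem.Chars.join [] parts = parts.flatten := by
  induction parts with
  | nil => simp [PySem.Chars.join_nil]
  | cons p ps ih =>
    cases ps with
    | nil => simp [PySem.Chars.join_singleton]
    | cons q r => simp [PySem.Chars.join_cons_cons, ih]

-- ---- counting ----
theorem pv_toNat_ofNat (n : Nat) (h : n < 128) : (Char.ofNat n).toNat = n := by
  have hv : n.isValidChar := Or.inl (by omega)
  simp [Char.ofNat, hv, Char.ofNatAux, Char.toNat]

def pvCounts (pre : List Char) : List Int := pre.foldl pvB_bump (List.replicate 128 0)

theorem pv_getD_foldl_bump (l : List Char) : ∀ (counts : List Int) (k : Nat),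
    counts.length = 128 → (∀ c ∈ l, c.toNat < 128) → k < 128 →
    PySem.List.pyGetD (l.foldl pvB_bump counts) (k : Int) 0
      = PySem.List.pyGetD counts (k : Int) 0 + (l.count (Char.ofNat k) : Int) := by
  induction l with
  | nil => intro counts k _ _ _; simp
  | cons c rest ih =>
    intro counts k hlen hall hk
    have hc : c.toNat < 128 := hall c (by simp)
    have hlen' : (pvB_bump counts c).length = 128 := by
      simp only [pvB_bump, PySem.List.length_pySetD]; exact hlen
    rw [List.foldl_cons, ih (pvB_bump counts c) k hlen' (fun x hx => hall x (by simp [hx])) hk]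
    have hset := PySem.List.pyGetD_pySetD_natCast counts c.toNat k
      (PySem.List.pyGetD counts (c.toNat : Int) 0 + 1) 0 (by omega)
    rw [List.count_cons]
    by_cases hkc : k = c.toNat
    · subst hkc
      rw [Char.ofNat_toNat c]
      simp only [pvB_bump]
      rw [hset, if_pos rfl]
      simp
      omega
    · have hne : (c == Char.ofNat k) = false := by
        simp only [beq_eq_false_iff_ne, ne_eq]
        intro hcc
        rw [hcc, pv_toNat_ofNat k hk] at hc hkc
        exact hkc rfl
      simp only [pvB_bump]
      rw [hset, if_neg hkc, hne]
      simp

theorem pv_counts_spec (pre : List Char) (k : Nat) (hpre : pvAsciiRow pre) (hk : k < 128) :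
    PySem.List.pyGetD (pvCounts pre) (k : Int) 0 = (pre.count (Char.ofNat k) : Int) := by
  rw [pvCounts, pv_getD_foldl_bump pre (List.replicate 128 0) k (by simp) hpre hk,
    PySem.List.pyGetD_natCast, List.getD]
  rcases h : (List.replicate 128 (0:Int))[k]? with _ | v
  · simp
  · have := List.mem_of_getElem? h
    simp [List.eq_of_mem_replicate this]

-- ---- flush of the counts of `pre` is sorted(pre, reverse=rev) ----

theorem pv_sum_counts (a : Char) (pre : List Char) :
    ∀ (codes : List Int), codes.Nodup → (∀ c ∈ codes, 0 ≤ c ∧ c < 128) →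
    ((codes.map (fun c => List.count a (List.replicate (pre.count (Char.ofNat c.toNat)) (Char.ofNat c.toNat)))).sum)
      = if (a.toNat : Int) ∈ codes ∧ a.toNat < 128 then pre.count a else 0 := by
  intro codes
  induction codes with
  | nil => simp
  | cons c cs ih =>
    intro hnd hb
    have hnd' := (List.nodup_cons.mp hnd)
    have hb' : ∀ x ∈ cs, 0 ≤ x ∧ x < 128 := fun x hx => hb x (by simp [hx])
    have hc := hb c (by simp)
    rw [List.map_cons, List.sum_cons, ih hnd'.2 hb', List.count_replicate]
    by_cases hca : Char.ofNat c.toNat = a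
    · have ha128 : a.toNat < 128 := by
        rw [← hca, pv_toNat_ofNat c.toNat (by omega)]; omega
      have hceq : (a.toNat : Int) = c := by
        rw [← hca, pv_toNat_ofNat c.toNat (by omega)]
        omega
      have hnotmem : ¬ ((a.toNat : Int) ∈ cs ∧ a.toNat < 128) := by
        rw [hceq]; exact fun h => hnd'.1 h.1
      rw [if_neg hnotmem, if_pos (by simp [hca]), if_pos ⟨by simp [hceq], ha128⟩, hca]
      omega
    · rw [if_neg (by simpa using hca)]
      by_cases ha128 : a.toNat < 128
      · have : ((a.toNat : Int) ∈ c :: cs ∧ a.toNat < 128) ↔ ((a.toNat : Int) ∈ cs ∧ a.toNat < 128) := by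
          constructor
          · rintro ⟨hm, h2⟩
            rcases List.mem_cons.mp hm with h | h
            · exfalso; apply hca
              have : c.toNat = a.toNat := by omega
              rw [this, Char.ofNat_toNat]
            · exact ⟨h, h2⟩
          · exact fun ⟨hm, h2⟩ => ⟨by simp [hm], h2⟩
        rw [if_congr this rfl rfl]
        omega
      · simp only [ha128, and_false, if_false]

theorem pv_rep_pairwise {r : Char → Char → Prop} (hx : ∀ x, r x x) (n : Nat) (x : Char) :
    (List.replicate n x).Pairwise r := by
  induction n with
  | zero => simp
  | succ n ih =>
    rw [List.replicate_succ, List.pairwise_cons]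
    exact ⟨fun y hy => (List.eq_of_mem_replicate hy) ▸ hx x, ih⟩

theorem pv_flatten_pairwise (r : Char → Char → Prop) (hr : ∀ x, r x x)
    (n : Int → Nat) (codes : List Int)
    (hp : codes.Pairwise (fun c d => r (Char.ofNat c.toNat) (Char.ofNat d.toNat))) :
    ((codes.map (fun c => List.replicate (n c) (Char.ofNat c.toNat))).flatten).Pairwise r := by
  rw [List.pairwise_flatten]
  constructor
  · intro l hl
    simp only [List.mem_map] at hl
    obtain ⟨c, -, rfl⟩ := hl
    exact pv_rep_pairwise hr _ _
  · rw [List.pairwise_map]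
    refine hp.imp_of_mem ?_
    intro c d _ _ h x hx y hy
    rw [List.eq_of_mem_replicate hx, List.eq_of_mem_replicate hy]
    exact h

theorem pv_chr_le {a b : Char} (h : a.toNat ≤ b.toNat) : a ≤ b := Char.le_def.mpr h

theorem pv_flush_sorted (rev : Bool) (pre : List Char) (hpre : pvAsciiRow pre) :
    pvB_flush rev (pvCounts pre) = PySem.List.sorted pre (fun x => x) rev := by
  have hrw : ∀ (codes : List Int), (∀ c ∈ codes, 0 ≤ c ∧ c < 128) →
      (codes.map (fun c => List.replicate (PySem.List.pyGetD (pvCounts pre) c 0).toNat (Char.ofNat c.toNat)))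
        = codes.map (fun c => List.replicate (pre.count (Char.ofNat c.toNat)) (Char.ofNat c.toNat)) := by
    intro codes hb
    refine List.map_congr_left ?_
    intro c hc
    have h0 := hb c hc
    have hcast : ((c.toNat : Nat) : Int) = c := Int.toNat_of_nonneg h0.1
    rw [← hcast, pv_counts_spec pre c.toNat hpre (by omega)]
    simp
    rw [max_eq_left h0.1]
  have hperm : ∀ (codes : List Int), codes.Nodup → (∀ c ∈ codes, 0 ≤ c ∧ c < 128) →
      (∀ k : Nat, k < 128 → (k : Int) ∈ codes) →
      ((codes.map (fun c => List.replicate (pre.count (Char.ofNat c.toNat)) (Char.ofNat c.toNat))).flatten).Perm pre := by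
    intro codes hnd hb hcomp
    rw [List.perm_iff_count]
    intro a
    rw [List.count_flatten, List.map_map]
    simp only [Function.comp_def]
    rw [pv_sum_counts a pre codes hnd hb]
    by_cases ha : a.toNat < 128
    · rw [if_pos ⟨hcomp a.toNat ha, ha⟩]
    · rw [if_neg (by tauto)]
      symm
      rw [List.count_eq_zero]
      intro hmem
      exact ha (hpre a hmem)
  cases rev with
  | false =>
    have hb : ∀ c ∈ PySem.List.pyRange 0 128 1, 0 ≤ c ∧ c < 128 := by
      intro c hc; exact PySem.List.mem_pyRange_one.mp hc
    simp only [pvB_flush, if_false, Bool.false_eq_true, pv_join_nil_flatten]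
    rw [hrw _ hb]
    refine PySem.List.eq_of_perm_of_pairwise_le ?_ ?_ ?_
    · exact ((hperm _ (PySem.List.nodup_pyRange_one 0 128) hb
        (fun k hk => PySem.List.mem_pyRange_one.mpr (by omega))).trans
        (PySem.List.sorted_perm pre (fun x => x) false).symm)
    · refine pv_flatten_pairwise (fun x1 x2 => x1 ≤ x2) (fun x => le_refl x) _ _ ?_
      refine (PySem.List.pairwise_lt_pyRange_one 0 128).imp_of_mem ?_
      intro c d hc hd hlt
      have h1 := hb c hc; have h2 := hb d hd
      refine pv_chr_le ?_
      rw [pv_toNat_ofNat _ (by omega), pv_toNat_ofNat _ (by omega)]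
      omega
    · have := PySem.List.sorted_pairwise pre (fun x => x)
      simpa using this
  | true =>
    have hrev : PySem.List.pyRange 127 (-1) (-1) = (PySem.List.pyRange 0 128 1).reverse := by
      rw [PySem.List.pyRange_neg_one_eq_reverse]; norm_num
    have hb : ∀ c ∈ (PySem.List.pyRange 0 128 1).reverse, 0 ≤ c ∧ c < 128 := by
      intro c hc; exact PySem.List.mem_pyRange_one.mp (List.mem_reverse.mp hc)
    simp only [pvB_flush, if_true, pv_join_nil_flatten, hrev]
    rw [hrw _ hb]
    refine List.eq_of_perm_of_sorted (le := fun a b : Char => b ≤ a)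
      (fun a b _ _ h1 h2 => le_antisymm h2 h1) ?_ ?_ ?_
    · refine pv_flatten_pairwise (fun x1 x2 => x2 ≤ x1) (fun x => le_refl x) _ _ ?_
      rw [List.pairwise_reverse]
      refine (PySem.List.pairwise_lt_pyRange_one 0 128).imp_of_mem ?_
      intro c d hc hd hlt
      have h1 := PySem.List.mem_pyRange_one.mp hc
      have h2 := PySem.List.mem_pyRange_one.mp hd
      refine pv_chr_le ?_
      rw [pv_toNat_ofNat _ (by omega), pv_toNat_ofNat _ (by omega)]
      omega
    · have := PySem.List.sorted_pairwise_rev pre (fun x => x)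
      simpa using this
    · exact ((hperm _ (by rw [List.nodup_reverse]; exact PySem.List.nodup_pyRange_one 0 128) hb
        (fun k hk => List.mem_reverse.mpr (PySem.List.mem_pyRange_one.mpr (by omega)))).trans
        (PySem.List.sorted_perm pre (fun x => x) true).symm)

-- ---- pack = tiltRow on ASCII rows ----
theorem pv_packGo_spec (rev : Bool) (rest : List Char) : ∀ (pre : List Char) (out : List (List Char)),
    pvAsciiRow rest → pvAsciiRow pre → '#' ∉ pre →
    pvB_packGo rev rest (pvCounts pre) out
      = PySem.Chars.join [] out
        ++ PySem.Chars.join ['#'] ((pvSplit (pre ++ rest) []).map (fun s => PySem.List.sorted s (fun x => x) rev)) := by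
  induction rest with
  | nil =>
    intro pre out _ hpre hnh
    simp only [pvB_packGo, List.append_nil]
    rw [pv_join_nil_flatten, List.flatten_append, pv_flush_sorted rev pre hpre,
      pvSplit_no_hash _ [] hnh]
    simp [PySem.Chars.join_singleton, pv_join_nil_flatten]
  | cons ch rest ih =>
    intro pre out hrest hpre hnh
    have hrest' : pvAsciiRow rest := fun c hc => hrest c (by simp [hc])
    by_cases hc : ch = '#'
    · subst hc
      simp only [pvB_packGo, beq_self_eq_true, if_true]
      have hz : (List.replicate 128 (0:Int)) = pvCounts [] := rfl
      rw [hz, ih [] _ hrest' (by intro c hcm; cases hcm) (by simp)]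
      rw [pvSplit_hash pre rest [] hnh]
      simp only [List.reverse_nil, List.nil_append, List.map_cons]
      obtain ⟨q, r, hqr⟩ : ∃ q r, pvSplit rest [] = q :: r := by
        cases hsp : pvSplit rest [] with
        | nil => exact absurd hsp (pvSplit_ne_nil rest [])
        | cons q r => exact ⟨q, r, rfl⟩
      rw [hqr, List.map_cons, PySem.Chars.join_cons_cons,
        pv_join_nil_flatten, pv_join_nil_flatten, List.flatten_append,
        pv_flush_sorted rev pre hpre]
      simp
    · have hb : (ch == '#') = false := by simpa using hc
      simp only [pvB_packGo, hb, Bool.false_eq_true, if_false]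
      have hbump : pvB_bump (pvCounts pre) ch = pvCounts (pre ++ [ch]) := by
        simp [pvCounts, List.foldl_append]
      have hpre' : pvAsciiRow (pre ++ [ch]) := by
        intro c hcm
        rcases List.mem_append.mp hcm with h | h
        · exact hpre c h
        · simp only [List.mem_singleton] at h; subst h; exact hrest _ (by simp)
      have hnh' : '#' ∉ pre ++ [ch] := by
        intro hm
        rcases List.mem_append.mp hm with h | h
        · exact hnh h
        · simp at h; exact hc h.symm
      rw [hbump, ih (pre ++ [ch]) out hrest' hpre' hnh']
      simp

theorem pv_pack_eq (rev : Bool) (row : List Char) (h : pvAsciiRow row) :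
    pvB_pack rev row = pvA_tiltRow rev row := by
  have hz : (List.replicate 128 (0:Int)) = pvCounts [] := rfl
  rw [pvB_pack, hz, pv_packGo_spec rev row [] [] h (by intro c hcm; cases hcm) (by simp),
    pvA_tiltRow, pv_splitOn_eq]
  simp [PySem.Chars.join_nil]

-- ---- ascii preservation ----
theorem pv_transpose_ascii (m : List (List Char)) (h : pvAsciiGrid m) :
    pvAsciiGrid (pvB_transpose m) := by
  intro r hr c hc
  rw [pvB_transpose] at hr
  obtain ⟨j, hj, rfl⟩ := List.mem_map.mp hr
  obtain ⟨row, hrow, rfl⟩ := List.mem_map.mp hc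
  rw [PySem.List.pyGetD_natCast, List.getD]
  cases hg : row[j]? with
  | none => simp
  | some v =>
    simp only [Option.getD_some]
    exact h row hrow v (List.mem_of_getElem? hg)

theorem pv_flush_ascii (rev : Bool) (counts : List Int) : pvAsciiRow (pvB_flush rev counts) := by
  intro c hc
  have hrev : PySem.List.pyRange 127 (-1) (-1) = (PySem.List.pyRange 0 128 1).reverse := by
    rw [PySem.List.pyRange_neg_one_eq_reverse]; norm_num
  rw [pvB_flush, pv_join_nil_flatten] at hc
  rw [List.mem_flatten] at hc
  obtain ⟨l, hl, hcl⟩ := hc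
  rw [List.mem_map] at hl
  obtain ⟨code, hcode, rfl⟩ := hl
  have hb : 0 ≤ code ∧ code < 128 := by
    cases rev with
    | false => simpa using PySem.List.mem_pyRange_one.mp (by simpa using hcode)
    | true =>
      rw [if_pos rfl, hrev, List.mem_reverse] at hcode
      simpa using PySem.List.mem_pyRange_one.mp hcode
  rw [List.eq_of_mem_replicate hcl, pv_toNat_ofNat _ (by omega)]
  omega

theorem pv_packGo_ascii (rev : Bool) (rest : List Char) : ∀ (counts : List Int) (out : List (List Char)),
    (∀ p ∈ out, pvAsciiRow p) → pvAsciiRow (pvB_packGo rev rest counts out) := by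
  induction rest with
  | nil =>
    intro counts out hout c hc
    rw [pvB_packGo, pv_join_nil_flatten, List.mem_flatten] at hc
    obtain ⟨l, hl, hcl⟩ := hc
    rcases List.mem_append.mp hl with h | h
    · exact hout l h c hcl
    · simp only [List.mem_singleton] at h
      subst h
      exact pv_flush_ascii rev counts c hcl
  | cons ch rest ih =>
    intro counts out hout
    by_cases hc : ch = '#'
    · subst hc
      simp only [pvB_packGo, beq_self_eq_true, if_true]
      refine ih _ _ ?_
      intro p hp
      rcases List.mem_append.mp hp with h | h
      · exact hout p h
      · rw [List.mem_cons] at h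
        rcases h with h | h
        · subst h; exact pv_flush_ascii rev counts
        · rw [List.mem_singleton] at h; subst h
          intro c2 hcm
          rw [List.mem_singleton] at hcm; subst hcm
          decide
    · have hb : (ch == '#') = false := by simpa using hc
      simp only [pvB_packGo, hb, Bool.false_eq_true, if_false]
      exact ih _ _ hout

theorem pv_pack_ascii (rev : Bool) (row : List Char) : pvAsciiRow (pvB_pack rev row) := by
  exact pv_packGo_ascii rev row _ [] (by intro p hp; cases hp)

theorem pv_spin_ascii (t : List (List Char)) : pvAsciiGrid (pvB_spin t) := by
  intro r hr
  simp only [pvB_spin, List.mem_map] at hr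
  obtain ⟨row, -, rfl⟩ := hr
  exact pv_pack_ascii false row

-- ---- transpose agreement and the spin chain ----
theorem pv_transpose_eq (m : List (List Char)) : pvA_transpose m = pvB_transpose m := by
  simp [pvA_transpose, pvB_transpose, pvA_getCol]

theorem pv_tilt_north (t : List (List Char)) :
    pvA_tilt t "north" = pvA_transpose ((pvA_transpose t).map (pvA_tiltRow true)) := rfl
theorem pv_tilt_west (t : List (List Char)) :
    pvA_tilt t "west" = t.map (pvA_tiltRow true) := rfl
theorem pv_tilt_south (t : List (List Char)) :
    pvA_tilt t "south" = pvA_transpose ((pvA_transpose t).map (pvA_tiltRow false)) := rfl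
theorem pv_tilt_east (t : List (List Char)) :
    pvA_tilt t "east" = t.map (pvA_tiltRow false) := rfl

theorem pv_map_pack_ascii (rev : Bool) (g : List (List Char)) :
    pvAsciiGrid (g.map (pvB_pack rev)) := by
  intro r hr
  obtain ⟨row, -, rfl⟩ := List.mem_map.mp hr
  exact pv_pack_ascii rev row

theorem pv_spin_eq (t : List (List Char)) (h : pvAsciiGrid t) :
    pvA_tilt (pvA_tilt (pvA_tilt (pvA_tilt t "north") "west") "south") "east" = pvB_spin t := by
  have h1 : pvAsciiGrid (pvB_transpose t) := pv_transpose_ascii t h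
  have e1 : (pvB_transpose t).map (pvA_tiltRow true) = (pvB_transpose t).map (pvB_pack true) :=
    List.map_congr_left (fun r hr => (pv_pack_eq true r (h1 r hr)).symm)
  have h2 : pvAsciiGrid (pvB_transpose ((pvB_transpose t).map (pvB_pack true))) :=
    pv_transpose_ascii _ (pv_map_pack_ascii true (pvB_transpose t))
  have e2 : (pvB_transpose ((pvB_transpose t).map (pvB_pack true))).map (pvA_tiltRow true)
      = (pvB_transpose ((pvB_transpose t).map (pvB_pack true))).map (pvB_pack true) :=
    List.map_congr_left (fun r hr => (pv_pack_eq true r (h2 r hr)).symm)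
  have h3 : pvAsciiGrid (pvB_transpose ((pvB_transpose ((pvB_transpose t).map (pvB_pack true))).map (pvB_pack true))) :=
    pv_transpose_ascii _ (pv_map_pack_ascii true (pvB_transpose ((pvB_transpose t).map (pvB_pack true))))
  have e3 : (pvB_transpose ((pvB_transpose ((pvB_transpose t).map (pvB_pack true))).map (pvB_pack true))).map (pvA_tiltRow false)
      = (pvB_transpose ((pvB_transpose ((pvB_transpose t).map (pvB_pack true))).map (pvB_pack true))).map (pvB_pack false) :=
    List.map_congr_left (fun r hr => (pv_pack_eq false r (h3 r hr)).symm)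
  have h4 : pvAsciiGrid (pvB_transpose ((pvB_transpose ((pvB_transpose ((pvB_transpose t).map (pvB_pack true))).map (pvB_pack true))).map (pvB_pack false))) :=
    pv_transpose_ascii _ (pv_map_pack_ascii false (pvB_transpose ((pvB_transpose ((pvB_transpose t).map (pvB_pack true))).map (pvB_pack true))))
  have e4 : (pvB_transpose ((pvB_transpose ((pvB_transpose ((pvB_transpose t).map (pvB_pack true))).map (pvB_pack true))).map (pvB_pack false))).map (pvA_tiltRow false)
      = (pvB_transpose ((pvB_transpose ((pvB_transpose ((pvB_transpose t).map (pvB_pack true))).map (pvB_pack true))).map (pvB_pack false))).map (pvB_pack false) :=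
    List.map_congr_left (fun r hr => (pv_pack_eq false r (h4 r hr)).symm)
  rw [pv_tilt_north, pv_tilt_west, pv_tilt_south, pv_tilt_east]
  simp only [pv_transpose_eq]
  rw [e1, e2, e3, e4]
  rfl

-- ---- the two loops agree ----
theorem pv_loop_eq (fuel : Nat) : ∀ (a : Int) (t : List (List Char)) (d : PySem.Dict (List Char) Int),
    pvAsciiGrid t → 1 ≤ a → (∀ k v, d.get? k = some v → 1 ≤ v) →
    pvA_loop fuel a t d = pvB_loop fuel a t d := by
  induction fuel with
  | zero => intro a t d _ _ _; rfl
  | succ f ih =>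
    intro a t d ht ha hd
    have hspin := pv_spin_eq t ht
    simp only [pvA_loop, pvB_loop, hspin]
    cases hk : PySem.Dict.get? d (PySem.Chars.join [] (pvB_spin t)) with
    | none =>
      have hz : PySem.Dict.getD d (PySem.Chars.join [] (pvB_spin t)) 0 = 0 := by
        simp [PySem.Dict.getD, hk]
      rw [hz]
      simp only [beq_self_eq_true, if_true]
      refine ih (a + 1) _ _ (pv_spin_ascii t) (by omega) ?_
      intro k v hv
      rcases hins : decide (k = PySem.Chars.join [] (pvB_spin t)) with _ | _
      · rw [PySem.Dict.get?_insert d _ k a, if_neg (by simpa using hins)] at hv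
        exact hd k v hv
      · rw [PySem.Dict.get?_insert d _ k a, if_pos (by simpa using hins)] at hv
        have := Option.some.inj hv
        omega
    | some v =>
      have hv := hd _ _ hk
      have hgd : PySem.Dict.getD d (PySem.Chars.join [] (pvB_spin t)) 0 = v := by
        simp [PySem.Dict.getD, hk]
      rw [hgd]
      have hvz : (v == (0:Int)) = false := by simpa using (by omega : v ≠ 0)
      rw [hvz]
      simp

-- ===== VERDICT (by name: the statement is the Claim_ definition above) =====
theorem tilt_cycle_spec : Claim_equal_tilt_cycle := by
  intro tile amount hdom hpre
  have hascii : pvAsciiGrid (tile.map String.toList) := by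
    intro r hr c hc
    simp only [List.mem_map] at hr
    obtain ⟨str, hs, rfl⟩ := hr
    simp only [Dom_tilt_cycle, Bool.and_eq_true, List.all_eq_true, pvDomStr, pvDomChar] at hdom
    have := hdom.1 str hs c hc
    simp only [Bool.or_eq_true, Bool.and_eq_true, decide_eq_true_eq, beq_iff_eq,
      Nat.le_iff_lt_or_eq] at this
    omega
  have hloop := pv_loop_eq amount.toNat 1 (tile.map String.toList) PySem.Dict.empty hascii
    (by norm_num) (by intro k v hv; simp [PySem.Dict.empty, PySem.Dict.get?] at hv)
  simp only [Spec_tilt_cycle, tilt_cycle, tilt_cycle_alt, hloop]
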